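-- pv_equiv track=rewrite | github.com/rub1kub/kkepik | bot/schedules/schedule_image.py | _group_by_pair
-- ===== SOURCE A (Python) =====
-- def _group_by_pair(parsed: list[dict]) -> list[list[dict]]:
--     """
--     Группирует последовательные строки с одинаковым номером пары.
--     Возвращает список групп (1 или 2 элемента в каждой группе = подгруппы).
--     """
--     if not parsed:
--         return []
--
--     groups = []
--     current_group = [parsed[0]]
--
--     for p in parsed[1:]:
--         if p["pair"] == current_group[0]["pair"] and len(current_group) < 2:
--             current_group.append(p)
--         else:
--             groups.append(current_group)
--             current_group = [p]
--
--     groups.append(current_group)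
--     return groups
-- ===== SOURCE B (Python) =====
-- def _group_by_pair(parsed: list[dict]) -> list[list[dict]]:
--     # Pass 1: split into maximal runs of consecutive rows with equal pair number.
--     runs = []
--     for p in parsed:
--         if runs and runs[-1][0]["pair"] == p["pair"]:
--             runs[-1].append(p)
--         else:
--             runs.append([p])
--     # Pass 2: cut every run into consecutive chunks of at most 2 rows.
--     return [run[i:i + 2] for run in runs for i in range(0, len(run), 2)]
-- ===== Notes on version B (the rewrite author's own statement) =====
-- stated objective: idiomatic
-- what changed: A's single fused loop that threads a (groups, current-chunk) accumulator is replaced by two passes: detect maximal runs of consecutive rows with equal pair number, then cut each run into chunks of at most 2 via slicing; Pre_ excludes inputs (two or more rows, some row lacking the 'pair' key) on which both A and B raise KeyError.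
import Mathlib
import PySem

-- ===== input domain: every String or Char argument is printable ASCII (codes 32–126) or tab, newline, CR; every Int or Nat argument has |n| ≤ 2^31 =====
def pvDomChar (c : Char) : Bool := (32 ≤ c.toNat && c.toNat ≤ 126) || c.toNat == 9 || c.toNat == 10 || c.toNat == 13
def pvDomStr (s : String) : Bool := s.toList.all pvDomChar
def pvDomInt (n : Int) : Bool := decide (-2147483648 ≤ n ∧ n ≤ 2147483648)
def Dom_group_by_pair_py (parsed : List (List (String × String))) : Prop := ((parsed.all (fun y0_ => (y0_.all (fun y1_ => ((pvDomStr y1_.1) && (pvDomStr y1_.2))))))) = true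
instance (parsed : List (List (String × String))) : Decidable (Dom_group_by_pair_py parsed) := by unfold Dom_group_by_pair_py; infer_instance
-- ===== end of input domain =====

-- B replaces A's fused accumulator loop by a run-detection pass followed by a fixed-size
-- chunking pass (maximal equal-pair runs, then chunks of at most 2); objective: idiomatic/alternative decomposition.

-- d["pair"], totalised with a default: Pre_ guarantees the key is present wherever it is read.
def pvPair (d : List (String × String)) : String := ((PySem.Dict.mk d).get? "pair").getD ""

-- ===== PORT A =====
def group_by_pair_py (parsed : List (List (String × String))) : List (List (List (String × String))) :=
  match parsed with
  | [] => []
  | h :: t =>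
    let st := t.foldl
      (fun (st : List (List (List (String × String))) × List (List (String × String))) p =>
        if pvPair p = pvPair (st.2.headD []) ∧ st.2.length < 2 then
          (st.1, st.2 ++ [p])
        else
          (st.1 ++ [st.2], [p]))
      ([], [h])
    st.1 ++ [st.2]

-- ===== PORT B =====
-- run[i:i+2] for i in range(0, len(run), 2)
def pvChunks (run : List (List (String × String))) : List (List (List (String × String))) :=
  (PySem.List.pyRange 0 (PySem.List.len run) 2).map
    (fun i => PySem.List.slice run (some i) (some (i + 2)))

def group_by_pair_py_alt (parsed : List (List (String × String))) : List (List (List (String × String))) :=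
  let runs := parsed.foldl
    (fun (runs : List (List (List (String × String)))) p =>
      match runs.getLast? with
      | some last =>
        if pvPair (last.headD []) = pvPair p then
          runs.dropLast ++ [last ++ [p]]
        else
          runs ++ [[p]]
      | none => [[p]])
    []
  runs.flatMap pvChunks

-- ===== PRECONDITION & SPEC =====
-- Pre_ excludes exactly the inputs where Python A raises KeyError: two or more rows with
-- some row lacking the "pair" key (B raises KeyError on exactly the same inputs).
def Pre_group_by_pair_py (parsed : List (List (String × String))) : Prop :=
  parsed.length ≤ 1 ∨ ∀ d ∈ parsed, (((PySem.Dict.mk d).get? "pair").isSome = true)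
instance (parsed : List (List (String × String))) : Decidable (Pre_group_by_pair_py parsed) := by unfold Pre_group_by_pair_py; infer_instance
def pvWitness_group_by_pair_py : (List (List (String × String))) :=
  [[("pair", "1"), ("time", "08:00")], [("pair", "1")], [("pair", "2")]]

def Spec_group_by_pair_py (parsed : List (List (String × String))) (out : List (List (List (String × String)))) : Prop := out = group_by_pair_py_alt parsed
instance (parsed : List (List (String × String))) (out : List (List (List (String × String)))) : Decidable (Spec_group_by_pair_py parsed out) := by unfold Spec_group_by_pair_py; infer_instance

-- ===== CLAIM (what is proved, stated in full; the proofs are below) =====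
def Claim_equal_group_by_pair_py : Prop := ∀ (parsed : List (List (String × String))), Dom_group_by_pair_py parsed → Pre_group_by_pair_py parsed → Spec_group_by_pair_py parsed (group_by_pair_py parsed)

-- ===== LEMMAS AND PROOFS =====

def pvGa (cur : List (List (String × String))) :
    List (List (String × String)) → List (List (List (String × String)))
  | [] => [cur]
  | p :: t =>
    if pvPair p = pvPair (cur.headD []) ∧ cur.length < 2 then
      pvGa (cur ++ [p]) t
    else
      cur :: pvGa [p] t

def pvRuns (cur : List (List (String × String))) :
    List (List (String × String)) → List (List (List (String × String)))
  | [] => [cur]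
  | p :: t =>
    if pvPair (cur.headD []) = pvPair p then
      pvRuns (cur ++ [p]) t
    else
      cur :: pvRuns [p] t

def pvChunk2 : List (List (String × String)) → List (List (List (String × String)))
  | [] => []
  | [a] => [[a]]
  | a :: b :: t => [a, b] :: pvChunk2 t
theorem pvGa_loop (t : List (List (String × String)))
    (groups : List (List (List (String × String)))) (cur : List (List (String × String))) :
    (t.foldl
      (fun (st : List (List (List (String × String))) × List (List (String × String))) p =>
        if pvPair p = pvPair (st.2.headD []) ∧ st.2.length < 2 then
          (st.1, st.2 ++ [p])
        else
          (st.1 ++ [st.2], [p]))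
      (groups, cur)).1
    ++ [(t.foldl
      (fun (st : List (List (List (String × String))) × List (List (String × String))) p =>
        if pvPair p = pvPair (st.2.headD []) ∧ st.2.length < 2 then
          (st.1, st.2 ++ [p])
        else
          (st.1 ++ [st.2], [p]))
      (groups, cur)).2]
    = groups ++ pvGa cur t := by
  induction t generalizing groups cur with
  | nil => simp [pvGa]
  | cons p t ih =>
    simp only [List.foldl_cons, pvGa]
    by_cases hc : pvPair p = pvPair (cur.headD []) ∧ cur.length < 2
    · simp only [if_pos hc]
      exact ih groups (cur ++ [p])
    · simp only [if_neg hc]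
      rw [ih (groups ++ [cur]) [p], List.append_assoc]
      rfl

theorem pvRuns_loop (t : List (List (String × String)))
    (rs : List (List (List (String × String)))) (cur : List (List (String × String))) :
    t.foldl
      (fun (runs : List (List (List (String × String)))) p =>
        match runs.getLast? with
        | some last =>
          if pvPair (last.headD []) = pvPair p then
            runs.dropLast ++ [last ++ [p]]
          else
            runs ++ [[p]]
        | none => [[p]])
      (rs ++ [cur])
    = rs ++ pvRuns cur t := by
  induction t generalizing rs cur with
  | nil => simp [pvRuns]
  | cons p t ih =>
    simp only [List.foldl_cons, List.getLast?_concat, List.dropLast_concat, pvRuns]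
    by_cases hc : pvPair (cur.headD []) = pvPair p
    · rw [if_pos hc, if_pos hc, ih]
    · rw [if_neg hc, if_neg hc, ih (rs ++ [cur]) [p], List.append_assoc]
      rfl

theorem pvRuns_ne_nil (t cur : List (List (String × String))) : pvRuns cur t ≠ [] := by
  induction t generalizing cur with
  | nil => simp [pvRuns]
  | cons p t ih =>
    simp only [pvRuns]
    split
    · exact ih _
    · simp

theorem headD_append_left {α : Type} (l r : List α) (d : α) (h : l ≠ []) :
    (l ++ r).headD d = l.headD d := by
  cases l with
  | nil => exact absurd rfl h
  | cons x xs => rfl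

theorem pvRuns_prefix (t : List (List (String × String)))
    (cur d : List (List (String × String))) (hcur : cur ≠ [])
    (hd : pvPair ((d ++ cur).headD []) = pvPair (cur.headD [])) :
    pvRuns (d ++ cur) t = (d ++ (pvRuns cur t).headD []) :: (pvRuns cur t).tail := by
  induction t generalizing cur with
  | nil => simp [pvRuns]
  | cons p t ih =>
    simp only [pvRuns, hd]
    by_cases hc : pvPair (cur.headD []) = pvPair p
    · rw [if_pos hc, if_pos hc, List.append_assoc]
      exact ih (cur ++ [p]) (by simp [hcur])
        (by rw [← List.append_assoc,
              headD_append_left (d ++ cur) [p] [] (by simp [hcur]),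
              headD_append_left cur [p] [] hcur, hd])
    · rw [if_neg hc, if_neg hc]
      rfl

theorem pvChunks_eq_mapNat (run : List (List (String × String))) :
    pvChunks run = (List.range ((run.length + 1) / 2)).map
      (fun k => (run.drop (2 * k)).take 2) := by
  unfold pvChunks
  cases run with
  | nil => rfl
  | cons a rest =>
    rw [PySem.List.pyRange_of_pos 0 (PySem.List.len (a :: rest)) (by norm_num)]
    rw [List.map_map]
    simp only [PySem.List.len_eq, List.length_cons]
    rw [if_pos (by push_cast; omega)]
    have hn : ((((rest.length + 1 : Nat) : Int)) - 0 + 2 - 1) / 2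
        = (((rest.length + 1 + 1) / 2 : Nat) : Int) := by omega
    rw [hn, Int.toNat_natCast]
    apply List.map_congr_left
    intro k hk
    simp only [Function.comp]
    have h1 : (0 : Int) + 2 * (k : Int) = ((2 * k : Nat) : Int) := by push_cast; ring
    rw [h1]
    have h2 : ((2 * k : Nat) : Int) + 2 = ((2 * k : Nat) : Int) + ((2 : Nat) : Int) := by norm_num
    rw [h2, PySem.List.slice_natCast_add]

theorem pvChunks_eq_chunk2 (run : List (List (String × String))) :
    pvChunks run = pvChunk2 run := by
  rw [pvChunks_eq_mapNat]
  fun_induction pvChunk2 run with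
  | case1 => rfl
  | case2 a => simp [List.range_succ]
  | case3 a b t ih =>
    simp only [List.length_cons]
    have h2 : (t.length + 1 + 1 + 1) / 2 = (t.length + 1) / 2 + 1 := by omega
    rw [h2, List.range_succ_eq_map, List.map_cons, List.map_map]
    show _ = [a, b] :: pvChunk2 t
    congr 1

theorem pvGa_eq_chunks (t : List (List (String × String)))
    (cur : List (List (String × String))) (h : cur.length = 1 ∨ cur.length = 2) :
    pvGa cur t = (pvRuns cur t).flatMap pvChunk2 := by
  induction t generalizing cur with
  | nil =>
    simp only [pvGa, pvRuns, List.flatMap_cons, List.flatMap_nil, List.append_nil]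
    match cur, h with
    | [a], _ => rfl
    | [a, b], _ => rfl
  | cons p t ih =>
    match cur, h with
    | [a], _ =>
      simp only [pvGa, pvRuns]
      by_cases hc : pvPair p = pvPair ([a].headD [])
      · rw [if_pos ⟨hc, by simp⟩, if_pos hc.symm]
        exact ih ([a] ++ [p]) (Or.inr rfl)
      · rw [if_neg (fun hx => hc hx.1), if_neg (fun he => hc he.symm),
            List.flatMap_cons, ih [p] (Or.inl rfl)]
        rfl
    | [a, b], _ =>
      simp only [pvGa, pvRuns]
      rw [if_neg (by simp)]
      by_cases hc : pvPair ([a, b].headD []) = pvPair p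
      · rw [if_pos hc]
        obtain ⟨r, rs, hr⟩ := List.exists_cons_of_ne_nil (pvRuns_ne_nil t [p])
        have hpre := pvRuns_prefix t [p] [a, b] (by simp) (by simpa using hc)
        rw [hpre, hr, ih [p] (Or.inl rfl), hr]
        simp [pvChunk2, List.flatMap_cons]
      · rw [if_neg hc, List.flatMap_cons, ih [p] (Or.inl rfl)]
        rfl

-- ===== VERDICT =====
theorem group_by_pair_py_spec : Claim_equal_group_by_pair_py := by
  intro parsed _ _
  unfold Spec_group_by_pair_py group_by_pair_py group_by_pair_py_alt
  cases parsed with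
  | nil => rfl
  | cons h t =>
    simp only [List.foldl_cons]
    rw [pvGa_loop t [] [h]]
    have hb : (List.foldl
        (fun (runs : List (List (List (String × String)))) p =>
          match runs.getLast? with
          | some last =>
            if pvPair (last.headD []) = pvPair p then
              runs.dropLast ++ [last ++ [p]]
            else
              runs ++ [[p]]
          | none => [[p]])
        [[h]] t) = [] ++ pvRuns [h] t := pvRuns_loop t [] [h]
    simp only [List.getLast?_nil] 
    rw [hb]
    simp only [List.nil_append]
    rw [funext pvChunks_eq_chunk2]
    exact pvGa_eq_chunks t [h] (Or.inl rfl)
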